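-- pv_equiv track=rewrite | github.com/NGWi/deliberate-practice2 | binaryHashSort.py | countingHash
-- ===== SOURCE A (Python) =====
-- def countingHash(arr):
--     '''
--     Create a hash map to store the count of each integer, and retrieve the min and the max.
--     '''
--     counted_map = {arr[0]: 1}
--     min_val = max_val = arr[0]
--     for num in arr[1:]:
--         if num in counted_map:
--             counted_map[num] += 1
--         else:
--             counted_map[num] = 1
--         if num < min_val:
--             min_val = num
--         if num > max_val:
--             max_val = num
--
--     return counted_map, min_val, max_val
-- ===== SOURCE B (Python) =====
-- def countingHash(arr):
--     '''
--     Create a hash map to store the count of each integer, and retrieve the min and the max.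
--     Different algorithm: first collect the distinct values in first-appearance order,
--     then count each one with a full list.count scan (no incremental counting loop),
--     and take min/max with the builtins.
--     '''
--     keys = list(dict.fromkeys(arr))
--     counted_map = {k: arr.count(k) for k in keys}
--     return counted_map, min(arr), max(arr)
-- ===== Notes on version B (the rewrite author's own statement) =====
-- stated objective: alternative
-- what changed: Replaced A's single fused pass (incremental membership-branch counting plus running min/max accumulators seeded from arr[0]) by a dedup-then-count algorithm: distinct keys are collected first in first-appearance order, each key's count is obtained by a separate full list.count scan, and min/max come from the builtins; Pre_ excludes only the empty list, on which A raises IndexError.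
import Mathlib
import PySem

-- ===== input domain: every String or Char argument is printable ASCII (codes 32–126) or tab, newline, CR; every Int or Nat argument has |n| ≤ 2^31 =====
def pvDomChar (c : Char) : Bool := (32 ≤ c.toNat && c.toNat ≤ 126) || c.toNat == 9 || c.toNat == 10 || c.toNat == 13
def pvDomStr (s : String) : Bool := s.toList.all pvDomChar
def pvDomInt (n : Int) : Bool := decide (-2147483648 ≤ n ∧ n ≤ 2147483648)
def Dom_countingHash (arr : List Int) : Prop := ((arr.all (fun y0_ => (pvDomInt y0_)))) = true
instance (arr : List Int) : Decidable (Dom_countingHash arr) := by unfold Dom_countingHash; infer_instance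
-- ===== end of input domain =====

-- B replaces A's fused counting/min/max loop by a dedup-then-count algorithm (distinct keys first, then a full count scan per key, builtin min/max); Pre_ excludes only the empty list (A raises IndexError there).


-- ===== PORT A =====
def countingHash (arr : List Int) : (List (Int × Int)) × Int × Int :=
  match arr with
  | [] => ([], 0, 0)  -- unreachable under Pre_: Python A raises IndexError indexing an empty list here
  | a :: rest =>
    -- counted_map = {first: 1}; min_val = max_val = first; then the loop over the tail
    let st := rest.foldl (fun (s : PySem.Dict Int Int × Int × Int) num =>
        ((if s.1.contains num then s.1.modify num 0 (· + 1) else s.1.insert num 1),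
         (if num < s.2.1 then num else s.2.1),
         (if num > s.2.2 then num else s.2.2)))
      (((PySem.Dict.empty : PySem.Dict Int Int).insert a 1), a, a)
    (st.1.items, st.2.1, st.2.2)

-- ===== PORT B =====
def countingHash_alt (arr : List Int) : (List (Int × Int)) × Int × Int :=
  -- keys = list(dict.fromkeys(arr)); counted_map = {k: arr.count(k) for k in keys}
  let keys := PySem.List.dedup arr
  let counted := keys.foldl (fun (d : PySem.Dict Int Int) k =>
      d.insert k (PySem.List.count arr k : Int)) (PySem.Dict.empty : PySem.Dict Int Int)
  -- min(arr), max(arr): the .getD 0 is unreachable under Pre_ (arr ≠ [], min/max raise ValueError on [])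
  (counted.items, (PySem.List.min? arr (fun y => y)).getD 0, (PySem.List.max? arr (fun y => y)).getD 0)

-- ===== PRECONDITION & SPEC =====
-- Pre_ excludes exactly the empty list, on which Python A raises IndexError at its initial element access.
def Pre_countingHash (arr : List Int) : Prop := arr ≠ []
instance (arr : List Int) : Decidable (Pre_countingHash arr) := by unfold Pre_countingHash; infer_instance
def pvWitness_countingHash : List Int := [2, -1, 2, 3]

def Spec_countingHash (arr : List Int) (out : (List (Int × Int)) × Int × Int) : Prop := out = countingHash_alt arr
instance (arr : List Int) (out : (List (Int × Int)) × Int × Int) : Decidable (Spec_countingHash arr out) := by unfold Spec_countingHash; infer_instance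

-- ===== CLAIM (what is proved, stated in full; the proofs are below) =====
def Claim_equal_countingHash : Prop := ∀ (arr : List Int), Dom_countingHash arr → Pre_countingHash arr → Spec_countingHash arr (countingHash arr)

-- ===== LEMMAS AND PROOFS =====

-- A's branched update is exactly the Counter step.
lemma stepA_eq_modify (d : PySem.Dict Int Int) (n : Int) :
    (if d.contains n then d.modify n 0 (· + 1) else d.insert n 1) = d.modify n 0 (· + 1) := by
  by_cases h : d.contains n = true
  · simp [h]
  · simp only [Bool.not_eq_true] at h
    simp [h, PySem.Dict.modify, PySem.Dict.getD_of_not_contains d 0 h]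

-- A's triple-state fold splits into the Counter fold and running min/max folds.
lemma foldA_split (l : List Int) (d : PySem.Dict Int Int) (mn mx : Int) :
    l.foldl (fun (s : PySem.Dict Int Int × Int × Int) num =>
        ((if s.1.contains num then s.1.modify num 0 (· + 1) else s.1.insert num 1),
         (if num < s.2.1 then num else s.2.1),
         (if num > s.2.2 then num else s.2.2))) (d, mn, mx)
    = (l.foldl (fun d x => d.modify x 0 (· + 1)) d, l.foldl min mn, l.foldl max mx) := by
  induction l generalizing d mn mx with
  | nil => rfl
  | cons x t ih =>
    simp only [List.foldl_cons]
    rw [stepA_eq_modify d x, ih,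
      show (if x < mn then x else mn) = min mn x by split_ifs <;> omega,
      show (if x > mx then x else mx) = max mx x by split_ifs <;> omega]

-- A's dict (started at {the first element: 1}) is the Counter of the whole list.
lemma dictA_eq_counter (a : Int) (rest : List Int) :
    rest.foldl (fun d x => d.modify x 0 (· + 1))
        ((PySem.Dict.empty : PySem.Dict Int Int).insert a 1)
    = PySem.Dict.counter (a :: rest) := by
  rw [PySem.Dict.counter_eq_foldl]
  simp [PySem.Dict.modify]

-- Inserting pairwise-distinct fresh keys just appends the corresponding items.
lemma items_foldl_insert_fresh (l : List Int) (f : Int → Int) (d : PySem.Dict Int Int)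
    (hnd : l.Nodup) (hfresh : ∀ k ∈ l, k ∉ d.keys) :
    (l.foldl (fun (d : PySem.Dict Int Int) k => d.insert k (f k)) d).items
      = d.items ++ l.map (fun k => (k, f k)) := by
  induction l generalizing d with
  | nil => simp
  | cons x t ih =>
    have hx : d.contains x = false := by
      have := hfresh x (List.mem_cons_self)
      rw [← Bool.not_eq_true]
      exact fun h => this ((PySem.Dict.contains_iff_mem_keys d x).mp h)
    simp only [List.foldl_cons, List.map_cons]
    rw [ih (d.insert x (f x)) hnd.of_cons ?_,
        PySem.Dict.items_insert_of_not_contains d (f x) hx, List.append_assoc]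
    · rfl
    · intro k hk
      rw [PySem.Dict.mem_keys_insert]
      rintro (rfl | hmem)
      · exact (List.nodup_cons.mp hnd).1 hk
      · exact hfresh k (List.mem_cons_of_mem _ hk) hmem

-- B's dict comprehension over the deduped keys produces Counter(arr)'s items.
lemma itemsB_eq_counter_items (arr : List Int) :
    ((PySem.List.dedup arr).foldl (fun (d : PySem.Dict Int Int) k =>
        d.insert k (PySem.List.count arr k : Int)) (PySem.Dict.empty : PySem.Dict Int Int)).items
      = (PySem.Dict.counter arr).items := by
  rw [items_foldl_insert_fresh _ _ _ (by simp [PySem.Set.nodup_ofList]) (by simp [PySem.Dict.keys_empty]),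
      PySem.Dict.items_counter]
  simp [PySem.Dict.empty, PySem.List.count_eq]

-- ===== VERDICT (by name: the statement is the Claim_ definition above) =====
theorem countingHash_spec : Claim_equal_countingHash := by
  intro arr _ hpre
  unfold Spec_countingHash
  match arr with
  | [] => exact absurd rfl hpre
  | a :: rest =>
    show countingHash (a :: rest) = countingHash_alt (a :: rest)
    simp only [countingHash, countingHash_alt, foldA_split, dictA_eq_counter,
      itemsB_eq_counter_items,
      PySem.List.min?_id_cons, PySem.List.max?_id_cons, Option.getD_some]
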